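-- pv_equiv track=rewrite | github.com/IamAsteriod07/AI-InterviewPrep | netcore1.py | count_special_ranges
-- ===== SOURCE A (Python) =====
-- def count_special_ranges(n: int, k: int, lower: int, upper: int, types: str, specials: str) -> int:
--     special_set = set(specials)
--     binary = [1 if ch in special_set else 0 for ch in types]
--
--     def count_at_most(limit: int) -> int:
--         if limit < 0:
--             return 0
--         total = 0
--         current = 0
--         left = 0
--         for right, val in enumerate(binary):
--             current += val
--             while current > limit:
--                 current -= binary[left]
--                 left += 1
--             total += right - left + 1
--         return total
--
--     return count_at_most(upper) - count_at_most(lower - 1)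
-- ===== SOURCE B (Python) =====
-- def count_special_ranges(n: int, k: int, lower: int, upper: int, types: str, specials: str) -> int:
--     special_set = set(specials)
--     prefix = [0]
--     s = 0
--     for ch in types:
--         if ch in special_set:
--             s += 1
--         prefix.append(s)
--
--     def first_ge(hi: int, x: int) -> int:
--         # least idx in [0, hi) with prefix[idx] >= x, or hi if none (prefix is nondecreasing)
--         lo = 0
--         while lo < hi:
--             mid = (lo + hi) // 2
--             if prefix[mid] < x:
--                 lo = mid + 1
--             else:
--                 hi = mid
--         return lo
--
--     total = 0
--     for j in range(1, len(prefix)):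
--         total += first_ge(j, prefix[j] - (lower - 1)) - first_ge(j, prefix[j] - upper)
--     return total
-- ===== Notes on version B (the rewrite author's own statement) =====
-- stated objective: alternative
-- what changed: Replaced the two expanding sliding-window at-most passes by one pass over a prefix-sum array of the special indicator, counting for each end position the admissible start positions with two binary searches on the (nondecreasing) prefix array.
import Mathlib
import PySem

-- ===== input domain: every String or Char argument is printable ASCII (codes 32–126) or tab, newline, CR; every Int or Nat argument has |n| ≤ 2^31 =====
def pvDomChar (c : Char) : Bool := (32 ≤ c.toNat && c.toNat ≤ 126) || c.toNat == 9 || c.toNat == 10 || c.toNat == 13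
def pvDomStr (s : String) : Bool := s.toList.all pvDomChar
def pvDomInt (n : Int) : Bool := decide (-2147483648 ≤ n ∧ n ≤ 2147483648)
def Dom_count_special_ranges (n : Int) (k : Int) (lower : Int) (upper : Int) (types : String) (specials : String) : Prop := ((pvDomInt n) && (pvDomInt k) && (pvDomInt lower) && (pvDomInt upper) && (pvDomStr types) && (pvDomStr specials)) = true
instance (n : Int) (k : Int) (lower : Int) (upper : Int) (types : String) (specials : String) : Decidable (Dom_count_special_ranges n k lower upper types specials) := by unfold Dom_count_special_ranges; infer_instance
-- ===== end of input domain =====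

-- B replaces A's two sliding-window at-most passes by one pfx-sum array with two binary
-- searches per end position (objective: alternative algorithm, similar cost).

-- ===== PORT A =====
-- inner 'while current > limit: current -= binary[left]; left += 1' of count_at_most;
-- fuel only bounds the recursion (the loop moves left towards len(binary), so the fuel the
-- wrapper passes is never exhausted); the 'none' branch is where Python would raise
-- IndexError (never reached: limit ≥ 0 there)
def csrShrinkF : Nat → List Int → Int → Int → Nat → Int × Nat
  | 0, _, _, current, left => (current, left)
  | fuel + 1, binary, limit, current, left =>
    if current > limit then
      match binary[left]? with
      | some v => csrShrinkF fuel binary limit (current - v) (left + 1)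
      | none => (current, left)
    else (current, left)

def csrShrink (binary : List Int) (limit : Int) (current : Int) (left : Nat) : Int × Nat :=
  csrShrinkF (binary.length + 1 - left) binary limit current left

-- count_at_most(limit): state (total, current, left) folded over enumerate(binary)
def csrAtMost (binary : List Int) (limit : Int) : Int :=
  if limit < 0 then 0
  else
    ((PySem.List.enumerate binary 0).foldl
      (fun (st : Int × Int × Nat) rv =>
        let current := st.2.1 + rv.2
        let p := csrShrink binary limit current st.2.2
        (st.1 + (rv.1 - (p.2 : Int) + 1), p.1, p.2))
      (0, 0, 0)).1

def count_special_ranges (n : Int) (k : Int) (lower : Int) (upper : Int) (types : String) (specials : String) : Int :=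
  let special_set : PySem.Set Char := PySem.Set.ofList specials.toList
  let binary := types.toList.map (fun ch => if PySem.Set.contains special_set ch then (1 : Int) else 0)
  csrAtMost binary upper - csrAtMost binary (lower - 1)

-- ===== PORT B =====
-- Source B's hand-written lower-bound binary search over the prefix list; fuel only bounds the
-- recursion (hi - lo shrinks at every call, so the fuel the wrapper passes is never
-- exhausted); the 'none' branch is where Python would raise IndexError (never reached:
-- 0 ≤ lo ≤ mid < hi ≤ len(pfx))
def altFirstGeF : Nat → List Int → Int → Int → Int → Int
  | 0, _, _, lo, _ => lo
  | fuel + 1, pfx, x, lo, hi =>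
    if lo < hi then
      let mid := PySem.Int.floordiv (lo + hi) 2
      match PySem.List.pyGet? pfx mid with
      | some v => if v < x then altFirstGeF fuel pfx x (mid + 1) hi else altFirstGeF fuel pfx x lo mid
      | none => lo
    else lo

def altFirstGe (pfx : List Int) (x : Int) (lo hi : Int) : Int :=
  altFirstGeF (hi - lo).toNat pfx x lo hi

def count_special_ranges_alt (n : Int) (k : Int) (lower : Int) (upper : Int) (types : String) (specials : String) : Int :=
  let special_set : PySem.Set Char := PySem.Set.ofList specials.toList
  -- pfx = [0]; s = 0; for ch in types: (s += 1 if special) ; pfx.append(s)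
  let pr := types.toList.foldl
    (fun (st : List Int × Int) ch =>
      let s := if PySem.Set.contains special_set ch then st.2 + 1 else st.2
      (st.1 ++ [s], s)) ([0], 0)
  let pfx := pr.1
  -- for j in range(1, len(pfx)): total += first_ge(j, pfx[j]-(lower-1)) - first_ge(j, pfx[j]-upper)
  (PySem.List.pyRange 1 (PySem.List.len pfx) 1).foldl
    (fun total j =>
      let pj := (PySem.List.pyGet? pfx j).getD 0  -- 1 ≤ j < len(pfx): never none
      total + (altFirstGe pfx (pj - (lower - 1)) 0 j - altFirstGe pfx (pj - upper) 0 j))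
    0

-- ===== PRECONDITION & SPEC =====
def Spec_count_special_ranges (n : Int) (k : Int) (lower : Int) (upper : Int) (types : String) (specials : String) (out : Int) : Prop := out = count_special_ranges_alt n k lower upper types specials
instance (n : Int) (k : Int) (lower : Int) (upper : Int) (types : String) (specials : String) (out : Int) : Decidable (Spec_count_special_ranges n k lower upper types specials out) := by unfold Spec_count_special_ranges; infer_instance

-- ===== CLAIM (what is proved, stated in full; the proofs are below) =====
def Claim_equal_count_special_ranges : Prop := ∀ (n : Int) (k : Int) (lower : Int) (upper : Int) (types : String) (specials : String), Dom_count_special_ranges n k lower upper types specials → Spec_count_special_ranges n k lower upper types specials (count_special_ranges n k lower upper types specials)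

-- ===== LEMMAS AND PROOFS =====

-- pfx sum of the first i entries of bs
def csrS (bs : List Int) (i : Nat) : Int := (bs.take i).sum

lemma csrS_zero (bs : List Int) : csrS bs 0 = 0 := rfl

lemma csrS_succ (bs : List Int) (i : Nat) (h : i < bs.length) :
    csrS bs (i + 1) = csrS bs i + bs.getD i 0 := by
  rw [List.getD_eq_getElem bs 0 h]
  exact List.sum_take_succ bs i h

lemma csrS_mono (bs : List Int) (hb : ∀ b ∈ bs, 0 ≤ b) {i j : Nat} (hij : i ≤ j) :
    csrS bs i ≤ csrS bs j := by
  induction j with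
  | zero => simp_all
  | succ j ih =>
    rcases Nat.lt_or_ge j bs.length with hj | hj
    · rcases Nat.eq_or_lt_of_le hij with rfl | h
      · exact le_refl _
      · calc csrS bs i ≤ csrS bs j := ih (by omega)
          _ ≤ csrS bs (j + 1) := by
              rw [csrS_succ bs j hj, List.getD_eq_getElem bs 0 hj]
              have := hb bs[j] (by simp)
              omega
    · have : csrS bs (j + 1) = csrS bs j := by
        simp [csrS, List.take_of_length_le (by omega : bs.length ≤ j),
          List.take_of_length_le (by omega : bs.length ≤ j + 1)]
      rcases Nat.eq_or_lt_of_le hij with rfl | h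
      · exact le_refl _
      · rw [this]; exact ih (by omega)

-- the list Source B's first loop appends after pfx's initial [0]
def csrPfxFrom (s : Int) : List Int → List Int
  | [] => []
  | b :: bs => (s + b) :: csrPfxFrom (s + b) bs

lemma length_csrPfxFrom (s : Int) (bs : List Int) : (csrPfxFrom s bs).length = bs.length := by
  induction bs generalizing s with
  | nil => rfl
  | cons b bs ih => simp [csrPfxFrom, ih]

lemma csrPfxFrom_get (bs : List Int) : ∀ (s : Int) (i : Nat), i < bs.length →
    (csrPfxFrom s bs)[i]? = some (s + csrS bs (i + 1)) := by
  induction bs with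
  | nil => intro s i h; simp at h
  | cons b bs ih =>
    intro s i h
    cases i with
    | zero => simp [csrPfxFrom, csrS, List.take_add_one]
    | succ i =>
      have := ih (s + b) i (by simpa using Nat.lt_of_succ_lt_succ h)
      simp only [csrPfxFrom, List.getElem?_cons_succ, this]
      have : csrS (b :: bs) (i + 1 + 1) = b + csrS bs (i + 1) := by
        simp [csrS, List.take_succ_cons]
      rw [this]; ring_nf

lemma csrFoldPre (bs : List Int) : ∀ (acc : List Int) (s : Int),
    bs.foldl (fun (st : List Int × Int) b => (st.1 ++ [st.2 + b], st.2 + b)) (acc, s)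
      = (acc ++ csrPfxFrom s bs, s + bs.sum) := by
  induction bs with
  | nil => intro acc s; simp [csrPfxFrom]
  | cons b bs ih =>
    intro acc s
    simp only [List.foldl_cons, ih, csrPfxFrom]
    simp [List.append_assoc]
    ring

-- the concrete pfx list and its indexing
lemma csrPrefix_get (bs : List Int) (i : Nat) (h : i < bs.length + 1) :
    ((0 : Int) :: csrPfxFrom 0 bs)[i]? = some (csrS bs i) := by
  cases i with
  | zero => simp [csrS_zero]
  | succ i =>
    have := csrPfxFrom_get bs 0 i (by omega)
    simp only [List.getElem?_cons_succ, this]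
    ring_nf

lemma altFirstGeF_stop (fuel : Nat) (p : List Int) (x lo hi : Int) (h : ¬ lo < hi) :
    altFirstGeF fuel p x lo hi = lo := by
  cases fuel with
  | zero => rfl
  | succ fuel => simp only [altFirstGeF, if_neg h]

lemma altFirstGe_stop (p : List Int) (x lo hi : Int) (h : ¬ lo < hi) :
    altFirstGe p x lo hi = lo :=
  altFirstGeF_stop _ p x lo hi h

lemma altFirstGeF_step (fuel : Nat) (p : List Int) (x lo hi v : Int) (h : lo < hi)
    (hget : PySem.List.pyGet? p (PySem.Int.floordiv (lo + hi) 2) = some v) :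
    altFirstGeF (fuel + 1) p x lo hi
      = if v < x then altFirstGeF fuel p x (PySem.Int.floordiv (lo + hi) 2 + 1) hi
        else altFirstGeF fuel p x lo (PySem.Int.floordiv (lo + hi) 2) := by
  simp only [altFirstGeF, if_pos h, hget]

-- correctness of Source B's binary search: characterisation of the returned index
lemma altFirstGeF_spec (p bs : List Int) (x : Int)
    (hp : ∀ i : Nat, i < p.length → p[i]? = some (csrS bs i))
    (hb : ∀ b ∈ bs, 0 ≤ b) :
    ∀ (fuel : Nat) (lo hi : Int), (hi - lo).toNat ≤ fuel → 0 ≤ lo → lo ≤ hi → hi ≤ (p.length : Int) →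
      lo ≤ altFirstGeF fuel p x lo hi ∧ altFirstGeF fuel p x lo hi ≤ hi ∧
      (∀ i : Nat, lo ≤ (i : Int) → (i : Int) < altFirstGeF fuel p x lo hi → csrS bs i < x) ∧
      (altFirstGeF fuel p x lo hi < hi → x ≤ csrS bs (altFirstGeF fuel p x lo hi).toNat) := by
  intro fuel
  induction fuel with
  | zero =>
    intro lo hi hf h0 hlh hhl
    have hnlt : ¬ lo < hi := by omega
    rw [altFirstGeF_stop 0 p x lo hi hnlt]
    exact ⟨le_refl _, hlh, fun i h1 h2 => absurd (h1.trans_lt h2) (lt_irrefl _),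
      fun h => absurd h hnlt⟩
  | succ fuel ih =>
    intro lo hi hf h0 hlh hhl
    by_cases hlt : lo < hi
    · have h2 := PySem.Int.floordiv_mul_add_mod (lo + hi) 2
      have h3 := PySem.Int.mod_nonneg (lo + hi) (b := 2) (by norm_num)
      have h4 := PySem.Int.mod_lt (lo + hi) (b := 2) (by norm_num)
      have hmlo : lo ≤ PySem.Int.floordiv (lo + hi) 2 := by omega
      have hmhi : PySem.Int.floordiv (lo + hi) 2 < hi := by omega
      have hmn : (0 : Int) ≤ PySem.Int.floordiv (lo + hi) 2 := by omega
      have hmlen : (PySem.Int.floordiv (lo + hi) 2).toNat < p.length := by omega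
      have hget : PySem.List.pyGet? p (PySem.Int.floordiv (lo + hi) 2)
          = some (csrS bs (PySem.Int.floordiv (lo + hi) 2).toNat) := by
        rw [PySem.List.pyGet?_of_nonneg p hmn]
        exact hp _ hmlen
      rw [altFirstGeF_step fuel p x lo hi _ hlt hget]
      by_cases hvx : csrS bs (PySem.Int.floordiv (lo + hi) 2).toNat < x
      · rw [if_pos hvx]
        obtain ⟨ha, hbb, hc, hd⟩ := ih (PySem.Int.floordiv (lo + hi) 2 + 1) hi
          (by omega) (by omega) (by omega) hhl
        refine ⟨by omega, hbb, ?_, hd⟩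
        intro i h1 h5
        by_cases him : (i : Int) ≤ PySem.Int.floordiv (lo + hi) 2
        · have hmono := csrS_mono bs hb
            (show i ≤ (PySem.Int.floordiv (lo + hi) 2).toNat by omega)
          exact lt_of_le_of_lt hmono hvx
        · exact hc i (by omega) h5
      · rw [if_neg hvx]
        obtain ⟨ha, hbb, hc, hd⟩ := ih lo (PySem.Int.floordiv (lo + hi) 2)
          (by omega) h0 (by omega) (by omega)
        refine ⟨ha, by omega, hc, ?_⟩
        intro _
        rcases lt_or_eq_of_le hbb with hlt2 | heq
        · exact hd hlt2
        · rw [heq]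
          exact not_lt.mp hvx
    · rw [altFirstGeF_stop (fuel + 1) p x lo hi hlt]
      exact ⟨le_refl _, hlh, fun i h1 h2 => absurd (h1.trans_lt h2) (lt_irrefl _),
        fun h => absurd h hlt⟩

lemma altFirstGe_spec (p bs : List Int) (x : Int)
    (hp : ∀ i : Nat, i < p.length → p[i]? = some (csrS bs i))
    (hb : ∀ b ∈ bs, 0 ≤ b) :
    ∀ (fuel : Nat) (lo hi : Int), (hi - lo).toNat ≤ fuel → 0 ≤ lo → lo ≤ hi → hi ≤ (p.length : Int) →
      lo ≤ altFirstGe p x lo hi ∧ altFirstGe p x lo hi ≤ hi ∧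
      (∀ i : Nat, lo ≤ (i : Int) → (i : Int) < altFirstGe p x lo hi → csrS bs i < x) ∧
      (altFirstGe p x lo hi < hi → x ≤ csrS bs (altFirstGe p x lo hi).toNat) := by
  intro _ lo hi _ h0 hlh hhl
  exact altFirstGeF_spec p bs x hp hb (hi - lo).toNat lo hi le_rfl h0 hlh hhl

-- uniqueness of the characterising properties
lemma csr_unique (bs : List Int) (x : Int) (j r1 r2 : Nat)
    (h1j : r1 ≤ j) (h1a : ∀ i < r1, csrS bs i < x) (h1b : x ≤ csrS bs r1 ∨ r1 = j)
    (h2j : r2 ≤ j) (h2a : ∀ i < r2, csrS bs i < x) (h2b : r2 < j → x ≤ csrS bs r2) :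
    r1 = r2 := by
  by_contra hne
  rcases Nat.lt_or_ge r1 r2 with h | h
  · rcases h1b with hx | rfl
    · exact absurd hx (not_le.mpr (h2a r1 h))
    · omega
  · have h' : r2 < r1 := by omega
    exact absurd (h2b (by omega)) (not_le.mpr (h1a r2 h'))

-- step equations of A's inner while loop
lemma csrShrinkF_stop (fuel : Nat) (bs : List Int) (limit current : Int) (left : Nat)
    (hc : ¬ current > limit) : csrShrinkF fuel bs limit current left = (current, left) := by
  cases fuel with
  | zero => rfl
  | succ fuel => simp only [csrShrinkF, if_neg hc]

lemma csrShrink_stop (bs : List Int) (limit current : Int) (left : Nat)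
    (hc : ¬ current > limit) : csrShrink bs limit current left = (current, left) :=
  csrShrinkF_stop _ bs limit current left hc

lemma csrShrink_step (bs : List Int) (limit current : Int) (left : Nat) (v : Int)
    (hget : bs[left]? = some v) (hc : current > limit) :
    csrShrink bs limit current left = csrShrink bs limit (current - v) (left + 1) := by
  have hlt : left < bs.length := (List.getElem?_eq_some_iff.mp hget).1
  unfold csrShrink
  have hf : bs.length + 1 - left = (bs.length + 1 - (left + 1)) + 1 := by omega
  rw [hf]
  simp only [csrShrinkF, if_pos hc, hget]

-- the left pointer B computes for end position j (as Int), limit = x-offset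
def csrLI (p bs : List Int) (limit : Int) (j : Nat) : Int :=
  altFirstGe p (csrS bs j - limit) 0 (j : Int)

-- inner while loop: shrink ends exactly at the first admissible start position
lemma csrShrink_spec (bs : List Int) (limit : Int) (hb : ∀ b ∈ bs, 0 ≤ b) (hl : 0 ≤ limit)
    (r1 : Nat) (hr1 : r1 ≤ bs.length) :
    ∀ (fuel left : Nat), r1 - left ≤ fuel → left ≤ r1 →
      (∀ i < left, csrS bs i < csrS bs r1 - limit) →
      ∃ L : Nat, csrShrink bs limit (csrS bs r1 - csrS bs left) left = (csrS bs r1 - csrS bs L, L) ∧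
        left ≤ L ∧ L ≤ r1 ∧ (∀ i < L, csrS bs i < csrS bs r1 - limit) ∧
        csrS bs r1 - limit ≤ csrS bs L := by
  intro fuel
  induction fuel with
  | zero =>
    intro left hf hle hpre
    by_cases hc : csrS bs r1 - csrS bs left > limit
    · exfalso
      have hlr : left < r1 := by
        rcases Nat.lt_or_ge left r1 with h | h
        · exact h
        · have heq : left = r1 := by omega
          subst heq
          simp at hc
          omega
      omega
    · exact ⟨left, by rw [csrShrink_stop bs limit _ left hc], le_refl _, hle, hpre,
        by linarith [not_lt.mp hc]⟩
  | succ fuel ih =>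
    intro left hf hle hpre
    by_cases hc : csrS bs r1 - csrS bs left > limit
    · have hlr : left < r1 := by
        rcases Nat.lt_or_ge left r1 with h | h
        · exact h
        · have heq : left = r1 := by omega
          subst heq
          simp at hc
          omega
      have hget : bs[left]? = some (bs.getD left 0) := by
        rw [List.getD_eq_getElem bs 0 (by omega)]
        exact List.getElem?_eq_getElem (by omega)
      have hS : csrS bs r1 - csrS bs left - bs.getD left 0 = csrS bs r1 - csrS bs (left + 1) := by
        have h6 := csrS_succ bs left (by omega)
        linarith
      rw [csrShrink_step bs limit _ left (bs.getD left 0) hget hc, hS]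
      have hpre' : ∀ i < left + 1, csrS bs i < csrS bs r1 - limit := by
        intro i hi
        rcases Nat.lt_or_ge i left with h | h
        · exact hpre i h
        · have heq : i = left := by omega
          subst heq
          linarith
      obtain ⟨L, heq2, h1, h2, h3, h4⟩ := ih (left + 1) (by omega) (by omega) hpre'
      exact ⟨L, heq2, by omega, h2, h3, h4⟩
    · exact ⟨left, by rw [csrShrink_stop bs limit _ left hc], le_refl _, hle, hpre,
        by linarith [not_lt.mp hc]⟩

lemma csrLI_zero (p bs : List Int) (limit : Int) : csrLI p bs limit 0 = 0 := by
  unfold csrLI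
  rw [altFirstGe_stop]
  omega

lemma csrLI_char (p bs : List Int) (limit : Int)
    (hp : ∀ i : Nat, i < p.length → p[i]? = some (csrS bs i))
    (hlen : p.length = bs.length + 1)
    (hb : ∀ b ∈ bs, 0 ≤ b) (j : Nat) (hj : j ≤ bs.length) :
    0 ≤ csrLI p bs limit j ∧ csrLI p bs limit j ≤ (j : Int) ∧
    (∀ i : Nat, (i : Int) < csrLI p bs limit j → csrS bs i < csrS bs j - limit) ∧
    (csrLI p bs limit j < (j : Int) → csrS bs j - limit ≤ csrS bs (csrLI p bs limit j).toNat) := by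
  have h := altFirstGe_spec p bs (csrS bs j - limit) hp hb j 0 (j : Int)
    (by omega) (by omega) (by omega) (by omega)
  exact ⟨h.1, h.2.1, fun i hi => h.2.2.1 i (by omega) hi, h.2.2.2⟩

-- the A loop invariant, phrased against B's binary search via uniqueness
lemma csrAtMost_eq (p bs : List Int) (limit : Int)
    (hp : ∀ i : Nat, i < p.length → p[i]? = some (csrS bs i))
    (hlen : p.length = bs.length + 1)
    (hb : ∀ b ∈ bs, 0 ≤ b) :
    csrAtMost bs limit
      = ((List.range bs.length).map
          (fun (t : Nat) => ((t : Int) + 1) - csrLI p bs limit (t + 1))).sum := by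
  by_cases hneg : limit < 0
  · unfold csrAtMost
    rw [if_pos hneg]
    symm
    apply List.sum_eq_zero
    intro y hy
    obtain ⟨t, ht, rfl⟩ := List.mem_map.mp hy
    have htl := List.mem_range.mp ht
    obtain ⟨c1, c2, c3, c4⟩ := csrLI_char p bs limit hp hlen hb (t + 1) (by omega)
    have hne : ¬ csrLI p bs limit (t + 1) < ((t + 1 : Nat) : Int) := by
      intro hlt
      have h5 := c4 hlt
      have h6 : csrS bs (csrLI p bs limit (t + 1)).toNat ≤ csrS bs (t + 1) :=
        csrS_mono bs hb (by omega)
      linarith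
    have heq : csrLI p bs limit (t + 1) = ((t + 1 : Nat) : Int) := by
      push_cast at c2 hne ⊢
      omega
    rw [heq]
    push_cast
    ring
  · have hl : 0 ≤ limit := by omega
    unfold csrAtMost
    rw [if_neg hneg]
    rw [PySem.List.enumerate_eq_map_pyRange bs 0, PySem.List.len_eq]
    suffices h : ∀ r : Nat, r ≤ bs.length →
        (((PySem.List.pyRange 0 (r : Int) 1).map
            (fun j => (j, PySem.List.pyGetD bs j 0))).foldl
          (fun (st : Int × Int × Nat) rv =>
            let current := st.2.1 + rv.2
            let q := csrShrink bs limit current st.2.2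
            (st.1 + (rv.1 - (q.2 : Int) + 1), q.1, q.2)) (0, 0, 0))
          = (((List.range r).map
              (fun (t : Nat) => ((t : Int) + 1) - csrLI p bs limit (t + 1))).sum,
             csrS bs r - csrS bs (csrLI p bs limit r).toNat, (csrLI p bs limit r).toNat) by
      rw [h bs.length le_rfl]
    intro r
    induction r with
    | zero =>
      intro _
      rw [PySem.List.pyRange_one_eq_nil (by omega)]
      simp [csrLI_zero, csrS_zero]
    | succ r ih =>
      intro hr1
      have hr : r ≤ bs.length := by omega
      have ihh := ih hr
      rw [Nat.cast_add, Nat.cast_one, PySem.List.pyRange_one_succ_right (by omega),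
        List.map_append, List.foldl_append, ihh]
      simp only [List.map_cons, List.map_nil, List.foldl_cons, List.foldl_nil]
      have hget : PySem.List.pyGetD bs (r : Int) 0 = bs.getD r 0 :=
        PySem.List.pyGetD_natCast bs r 0
      rw [hget]
      have hcur : csrS bs r - csrS bs (csrLI p bs limit r).toNat + bs.getD r 0
          = csrS bs (r + 1) - csrS bs (csrLI p bs limit r).toNat := by
        have h6 := csrS_succ bs r (by omega)
        linarith
      obtain ⟨c1, c2, c3, c4⟩ := csrLI_char p bs limit hp hlen hb r hr
      have hpre : ∀ i < (csrLI p bs limit r).toNat, csrS bs i < csrS bs (r + 1) - limit := by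
        intro i hi
        have h5 := c3 i (by omega)
        have hmono := csrS_mono bs hb (show r ≤ r + 1 by omega)
        linarith
      obtain ⟨L, heq, hL1, hL2, hL3, hL4⟩ := csrShrink_spec bs limit hb hl (r + 1) (by omega)
        (r + 1) (csrLI p bs limit r).toNat (by omega) (by omega) hpre
      obtain ⟨d1, d2, d3, d4⟩ := csrLI_char p bs limit hp hlen hb (r + 1) (by omega)
      have hRB : (((csrLI p bs limit (r + 1)).toNat : Int)) = csrLI p bs limit (r + 1) :=
        Int.toNat_of_nonneg d1
      have d3' : ∀ i < (csrLI p bs limit (r + 1)).toNat, csrS bs i < csrS bs (r + 1) - limit := by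
        intro i hi
        exact d3 i (by omega)
      have d4' : (csrLI p bs limit (r + 1)).toNat < r + 1 →
          csrS bs (r + 1) - limit ≤ csrS bs (csrLI p bs limit (r + 1)).toNat := by
        intro hlt
        exact d4 (by omega)
      have hLeq : L = (csrLI p bs limit (r + 1)).toNat :=
        csr_unique bs (csrS bs (r + 1) - limit) (r + 1) L (csrLI p bs limit (r + 1)).toNat
          hL2 hL3 (Or.inl hL4) (by omega) d3' d4'
      have hsum : ((List.range (r + 1)).map
            (fun (t : Nat) => ((t : Int) + 1) - csrLI p bs limit (t + 1))).sum
          = ((List.range r).map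
              (fun (t : Nat) => ((t : Int) + 1) - csrLI p bs limit (t + 1))).sum
            + ((r : Int) - (L : Int) + 1) := by
        rw [List.range_succ, List.map_append, List.sum_append]
        simp only [List.map_cons, List.map_nil, List.sum_cons, List.sum_nil]
        rw [hLeq]
        push_cast [hRB]
        ring
      simp only [hcur, heq, hLeq, hsum]

lemma csr_sum_sub (l : List Nat) (f g : Nat → Int) :
    (l.map f).sum - (l.map g).sum = (l.map (fun t => f t - g t)).sum := by
  induction l with
  | nil => simp
  | cons a l ih =>
    simp only [List.map_cons, List.sum_cons]
    linarith

-- ===== VERDICT (by name: the statement is the Claim_ definition above) =====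
theorem count_special_ranges_spec : Claim_equal_count_special_ranges := by
  intro n k lower upper types specials _
  unfold Spec_count_special_ranges count_special_ranges count_special_ranges_alt
  simp only [letFun]
  set sset := PySem.Set.ofList specials.toList with hsset
  set bs := types.toList.map
    (fun ch => if PySem.Set.contains sset ch then (1 : Int) else 0) with hbs
  have hb : ∀ b ∈ bs, 0 ≤ b := by
    intro b hbm
    rw [hbs] at hbm
    obtain ⟨ch, -, rfl⟩ := List.mem_map.mp hbm
    split <;> norm_num
  -- B's first loop builds the prefix list
  have hfold1 : types.toList.foldl
      (fun (st : List Int × Int) ch =>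
        (st.1 ++ [if PySem.Set.contains sset ch then st.2 + 1 else st.2],
         if PySem.Set.contains sset ch then st.2 + 1 else st.2)) ([0], 0)
      = ((0 : Int) :: csrPfxFrom 0 bs, 0 + bs.sum) := by
    have h1 : types.toList.foldl
        (fun (st : List Int × Int) ch =>
          (st.1 ++ [if PySem.Set.contains sset ch then st.2 + 1 else st.2],
           if PySem.Set.contains sset ch then st.2 + 1 else st.2)) ([0], 0)
        = bs.foldl (fun (st : List Int × Int) b => (st.1 ++ [st.2 + b], st.2 + b)) ([0], 0) := by
      rw [hbs, List.foldl_map]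
      apply PySem.List.foldl_congr_mem
      intro st ch _
      by_cases hch : ch ∈ sset
      · simp [hch]
      · simp [hch]
    rw [h1, csrFoldPre bs [0] 0]
    rfl
  set p : List Int := (0 : Int) :: csrPfxFrom 0 bs with hpdef
  have hplen : p.length = bs.length + 1 := by
    simp [hpdef, length_csrPfxFrom]
  have hp : ∀ i : Nat, i < p.length → p[i]? = some (csrS bs i) := by
    intro i hi
    exact csrPrefix_get bs i (by omega)
  rw [hfold1]
  rw [csrAtMost_eq p bs upper hp hplen hb, csrAtMost_eq p bs (lower - 1) hp hplen hb]
  dsimp only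
  rw [PySem.List.foldl_add]
  rw [PySem.List.len_eq, hplen]
  rw [PySem.List.pyRange_one 1 ((bs.length + 1 : Nat) : Int)]
  have hcount : (((bs.length + 1 : Nat) : Int) - 1).toNat = bs.length := by omega
  rw [hcount, List.map_map]
  have hptw : ∀ t ∈ List.range bs.length,
      ((fun j =>
          altFirstGe p ((PySem.List.pyGet? p j).getD 0 - (lower - 1)) 0 j
            - altFirstGe p ((PySem.List.pyGet? p j).getD 0 - upper) 0 j) ∘
        (fun k : Nat => (1 : Int) + (k : Int))) t
      = csrLI p bs (lower - 1) (t + 1) - csrLI p bs upper (t + 1) := by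
    intro t ht
    have htl := List.mem_range.mp ht
    have hcast : (1 : Int) + (t : Int) = ((t + 1 : Nat) : Int) := by push_cast; ring
    simp only [Function.comp_apply, hcast, PySem.List.pyGet?_natCast, hp (t + 1) (by omega),
      Option.getD_some]
    rfl
  rw [List.map_congr_left hptw, csr_sum_sub, zero_add]
  apply congrArg
  apply List.map_congr_left
  intro t _
  ring
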